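-- pv_equiv track=rewrite | github.com/pypi-data/pypi-mirror-400 | packages/raesl/raesl-0.16.2.tar.gz/raesl-0.16.2/src/raesl/excel/text.py | get_common_parts
-- ===== SOURCE A (Python) =====
-- from typing import Any, Dict, Iterable, List, Optional
--
-- def get_common_parts(strings: Iterable[str]) -> List[str]:
--     """Find out the largest shared substrings separated on dots '.'."""
--     result = []
--     # Get dotted string splits, reversed so later pops start at the first part.
--     splits = [s.split(".")[::-1] for s in strings]
--     if len(splits) == 1:
--         return splits[0][::-1]
--     while True:
--         try:
--             parts = [s.pop() for s in splits]
--             head = parts[0]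
--             for p in parts[1:]:
--                 if p != head:
--                     return result
--             result.append(head)
--         except IndexError:
--             return result
-- ===== SOURCE B (Python) =====
-- from typing import Iterable, List
--
--
-- def get_common_parts(strings: Iterable[str]) -> List[str]:
--     """Find out the largest shared substrings separated on dots '.'."""
--     splits = [s.split(".") for s in strings]
--     if not splits:
--         return []
--     lo = min(splits)
--     hi = max(splits)
--     result = []
--     for a, b in zip(lo, hi):
--         if a != b:
--             break
--         result.append(a)
--     return result
-- ===== Notes on version B (the rewrite author's own statement) =====
-- stated objective: alternative
-- what changed: Instead of column-wise simultaneous popping across all split lists with exception-driven control flow, B takes the lexicographic minimum and maximum of the split lists and returns the common prefix of just those two, relying on LCP(all) = LCP(min, max).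
import Mathlib
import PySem

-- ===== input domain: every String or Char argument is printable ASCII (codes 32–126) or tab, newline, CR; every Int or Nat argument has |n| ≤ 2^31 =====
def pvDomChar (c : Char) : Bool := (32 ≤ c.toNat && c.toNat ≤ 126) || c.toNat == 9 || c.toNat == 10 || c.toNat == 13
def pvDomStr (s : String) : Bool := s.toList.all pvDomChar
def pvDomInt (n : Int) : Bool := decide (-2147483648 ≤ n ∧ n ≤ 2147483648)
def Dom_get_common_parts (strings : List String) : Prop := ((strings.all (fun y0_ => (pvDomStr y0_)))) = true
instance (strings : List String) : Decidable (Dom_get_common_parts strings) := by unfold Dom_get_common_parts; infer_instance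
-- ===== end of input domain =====

-- B replaces A's column-wise simultaneous popping (with exception-driven exit) by the
-- common prefix of just the lexicographic minimum and maximum of the split lists
-- (LCP(all) = LCP(min, max)); return value proved equal on all inputs.

-- ===== PORT A =====

-- s.split(".") ; "." ≠ "" so split? is always `some` (the getD only totalizes)
def splitDot (s : String) : List String := (PySem.Str.split? s ".").getD []

-- [s.pop() for s in splits] : pops the last element of each list, left to right;
-- `none` = the IndexError raised at the first exhausted list.
def popAll : List (List String) → Option (List String × List (List String))
  | [] => some ([], [])
  | s :: rest =>
    match s.getLast? with
    | none => none
    | some last => (popAll rest).map (fun pr => (last :: pr.1, s.dropLast :: pr.2))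

def sumLen (L : List (List String)) : Nat := (L.map List.length).sum

-- facts about popAll needed for loopA's termination
theorem popAll_some : ∀ (L : List (List String)) {parts L'},
    popAll L = some (parts, L') →
    (∀ r ∈ L, r ≠ []) ∧ parts = L.map (fun r => r.getLast?.getD "") ∧ L' = L.map List.dropLast := by
  intro L
  induction L with
  | nil => intro parts L' h; simp [popAll] at h; simp [h.1, h.2]
  | cons s rest ih =>
    intro parts L' h
    cases hl : s.getLast? with
    | none =>
      simp [popAll, hl] at h
    | some last =>
      cases hr : popAll rest with
      | none => simp [popAll, hl, hr] at h
      | some pr =>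
        obtain ⟨hne, hp, hL⟩ := ih hr
        simp [popAll, hl, hr] at h
        obtain ⟨h1, h2⟩ := h
        refine ⟨?_, ?_, ?_⟩
        · intro r hmem
          simp at hmem
          rcases hmem with hmem | hmem
          · subst hmem; intro hnil; subst hnil; simp at hl
          · exact hne r hmem
        · simp [← h1, hl, hp]
        · simp [← h2, hL]

theorem sumLen_dropLast_le : ∀ (L : List (List String)), sumLen (L.map List.dropLast) ≤ sumLen L := by
  intro L
  induction L with
  | nil => simp [sumLen]
  | cons s rest ih =>
    simp only [sumLen, List.map_cons, List.sum_cons] at *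
    have : s.dropLast.length ≤ s.length := by simp [List.length_dropLast]
    omega

theorem sumLen_lt_of_popAll : ∀ (L : List (List String)) {L' : List (List String)} {head : String} {restp : List String},
    popAll L = some (head :: restp, L') → sumLen L' < sumLen L := by
  intro L L' head restp h
  obtain ⟨hne, hp, hL⟩ := popAll_some L h
  cases L with
  | nil => simp at hp
  | cons s rest =>
    subst hL
    have hs : s ≠ [] := hne s (by simp)
    have h1 : s.dropLast.length < s.length := by
      have := List.length_pos_iff.mpr hs
      simp [List.length_dropLast]; omega
    have h2 := sumLen_dropLast_le rest
    simp only [sumLen, List.map_cons, List.sum_cons] at *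
    omega

-- the `while True` loop of A: `result` is the accumulator, `return` = stop
def loopA (splits : List (List String)) (result : List String) : List String :=
  match h : popAll splits with
  | none => result                       -- IndexError from a pop
  | some (parts, splits') =>
    match parts with
    | [] => result                       -- IndexError from parts[0]
    | head :: restp =>
      if restp.all (fun p => p == head) then loopA splits' (result ++ [head])
      else result
termination_by sumLen splits
decreasing_by exact sumLen_lt_of_popAll splits h

def get_common_parts (strings : List String) : List String :=
  -- splits = [s.split(".")[::-1] for s in strings]  ([::-1] is List.reverse)
  let splits := strings.map (fun s => (splitDot s).reverse)
  match splits with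
  | [s0] => s0.reverse                   -- len(splits) == 1
  | _ => loopA splits []

-- ===== PORT B =====

-- the zip loop: append while the parts agree, break at the first mismatch
def lcpZip : List String → List String → List String
  | a :: xs, b :: ys => if a == b then a :: lcpZip xs ys else []
  | [], _ => []
  | _ :: _, [] => []

def get_common_parts_alt (strings : List String) : List String :=
  let splits := strings.map splitDot
  match splits with
  | [] => []
  | _ :: _ =>
    match PySem.List.min? splits (fun x => x), PySem.List.max? splits (fun x => x) with
    | some lo, some hi => lcpZip lo hi
    | none, _ => []                      -- unreachable: splits ≠ []
    | some _, none => []                 -- unreachable: splits ≠ []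

-- ===== PRECONDITION & SPEC =====
def Spec_get_common_parts (strings : List String) (out : List String) : Prop := out = get_common_parts_alt strings
instance (strings : List String) (out : List String) : Decidable (Spec_get_common_parts strings out) := by unfold Spec_get_common_parts; infer_instance

-- ===== CLAIM (what is proved, stated in full; the proofs are below) =====
def Claim_equal_get_common_parts : Prop := ∀ (strings : List String), Dom_get_common_parts strings → Spec_get_common_parts strings (get_common_parts strings)

-- ===== LEMMAS AND PROOFS =====

-- non-dependent unfolding equation for loopA
theorem loopA_eq (splits : List (List String)) (result : List String) : loopA splits result =
    match popAll splits with
    | none => result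
    | some (parts, splits') =>
      match parts with
      | [] => result
      | head :: restp =>
        if restp.all (fun p => p == head) then loopA splits' (result ++ [head])
        else result := by
  rw [loopA.eq_def]
  split
  · next hp => rw [hp]
  · next parts L' hp => simp only [hp]; cases parts <;> rfl

theorem loopA_acc : ∀ (n : Nat) (L : List (List String)), sumLen L ≤ n →
    ∀ acc, loopA L acc = acc ++ loopA L [] := by
  intro n
  induction n with
  | zero =>
    intro L hL acc
    rw [loopA_eq L acc, loopA_eq L []]
    cases hp : popAll L with
    | none => simp
    | some pr =>
      obtain ⟨parts, L'⟩ := pr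
      simp only
      cases parts with
      | nil => simp
      | cons head restp =>
        have hlt := sumLen_lt_of_popAll L hp
        omega
  | succ n ih =>
    intro L hL acc
    rw [loopA_eq L acc, loopA_eq L []]
    cases hp : popAll L with
    | none => simp
    | some pr =>
      obtain ⟨parts, L'⟩ := pr
      simp only
      cases parts with
      | nil => simp
      | cons head restp =>
        by_cases hall : (restp.all fun p => p == head) = true
        · have hlt := sumLen_lt_of_popAll L hp
          simp only [hall, if_true]
          rw [ih L' (by omega) (acc ++ [head]), ih L' (by omega) ([] ++ [head])]
          simp
        · simp [hall]

theorem loopA_cp : ∀ (n : Nat) (L : List (List String)), sumLen L ≤ n →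
    ∀ r ∈ L, loopA L [] <+: r.reverse := by
  intro n
  induction n with
  | zero =>
    intro L hL r hr
    rw [loopA_eq]
    cases hp : popAll L with
    | none => exact List.nil_prefix
    | some pr =>
      obtain ⟨parts, L'⟩ := pr
      simp only
      cases parts with
      | nil => exact List.nil_prefix
      | cons head restp =>
        have hlt := sumLen_lt_of_popAll L hp
        omega
  | succ n ih =>
    intro L hL r hr
    rw [loopA_eq]
    cases hp : popAll L with
    | none => exact List.nil_prefix
    | some pr =>
      obtain ⟨parts, L'⟩ := pr
      obtain ⟨hne, hparts, hL'⟩ := popAll_some L hp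
      simp only
      cases hps : parts with
      | nil => exact List.nil_prefix
      | cons head restp =>
        subst hps
        by_cases hall : (restp.all fun p => p == head) = true
        · have hlt := sumLen_lt_of_popAll L hp
          simp only [hall, if_true, List.nil_append]
          rw [loopA_acc n L' (by omega) [head]]
          have hr' : r ≠ [] := hne r hr
          have hmem : r.getLast?.getD "" ∈ head :: restp := by
            rw [hparts]; exact List.mem_map_of_mem hr
          have hgl : r.getLast?.getD "" = r.getLast hr' := by
            rw [List.getLast?_eq_some_getLast hr']; rfl
          have hhead : r.getLast hr' = head := by
            rw [← hgl]
            rcases List.mem_cons.mp hmem with h' | hmem'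
            · exact h'
            · exact eq_of_beq (List.all_eq_true.mp hall _ hmem')
          have hrev : r.reverse = head :: r.dropLast.reverse := by
            conv_lhs => rw [← List.dropLast_append_getLast hr']
            rw [List.reverse_append, hhead]
            rfl
          rw [hrev]
          refine List.cons_prefix_cons.mpr ⟨rfl, ?_⟩
          exact ih L' (by omega) r.dropLast (by rw [hL']; exact List.mem_map_of_mem hr)
        · simp only [hall]
          exact List.nil_prefix

theorem popAll_total : ∀ (L : List (List String)), (∀ r ∈ L, r ≠ []) →
    popAll L = some (L.map (fun r => r.getLast?.getD ""), L.map List.dropLast) := by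
  intro L
  induction L with
  | nil => intro _; simp [popAll]
  | cons s rest ih =>
    intro h
    have hs : s ≠ [] := h s (by simp)
    obtain ⟨a, ha⟩ := Option.ne_none_iff_exists'.mp (mt List.getLast?_eq_none_iff.mp hs)
    rw [popAll, ha, ih (fun r hr => h r (by simp [hr]))]
    simp [ha]

theorem rev_head_tail : ∀ (r : List String) (a : String) (t : List String), r.reverse = a :: t →
    r ≠ [] ∧ r.getLast? = some a ∧ t = r.dropLast.reverse := by
  intro r a t h
  have hr : r ≠ [] := by
    intro hnil; subst hnil; simp at h
  have hgl : r.getLast? = some a := by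
    rw [← List.head?_reverse, h]; rfl
  refine ⟨hr, hgl, ?_⟩
  have : r.reverse = r.getLast hr :: r.dropLast.reverse := by
    conv_lhs => rw [← List.dropLast_append_getLast hr]
    rw [List.reverse_append]
    rfl
  rw [List.getLast?_eq_some_getLast hr] at hgl
  have ha : r.getLast hr = a := by injection hgl
  rw [ha] at this
  have h2 := this.symm.trans h
  injection h2 with _ h3
  exact h3.symm

theorem loopA_max : ∀ (n : Nat) (L : List (List String)) (q : List String), sumLen L ≤ n →
    L ≠ [] → (∀ r ∈ L, q <+: r.reverse) → q <+: loopA L [] := by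
  intro n
  induction n with
  | zero =>
    intro L q hL hne hq
    cases q with
    | nil => exact List.nil_prefix
    | cons a q' =>
      obtain ⟨r0, Lt, rfl⟩ := List.exists_cons_of_ne_nil hne
      obtain ⟨t, ht, _⟩ := List.cons_prefix_iff.mp (hq r0 (by simp))
      obtain ⟨hr0, _, _⟩ := rev_head_tail r0 a t ht
      have : 0 < sumLen (r0 :: Lt) := by
        have := List.length_pos_iff.mpr hr0
        simp only [sumLen, List.map_cons, List.sum_cons]
        omega
      omega
  | succ n ih =>
    intro L q hL hne hq
    cases q with
    | nil => exact List.nil_prefix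
    | cons a q' =>
      have hnonnil : ∀ r ∈ L, r ≠ [] := by
        intro r hr
        obtain ⟨t, ht, _⟩ := List.cons_prefix_iff.mp (hq r hr)
        exact (rev_head_tail r a t ht).1
      have hlast : ∀ r ∈ L, r.getLast?.getD "" = a := by
        intro r hr
        obtain ⟨t, ht, _⟩ := List.cons_prefix_iff.mp (hq r hr)
        rw [(rev_head_tail r a t ht).2.1]; rfl
      have hp := popAll_total L hnonnil
      obtain ⟨r0, Lt, rfl⟩ := List.exists_cons_of_ne_nil hne
      rw [loopA_eq, hp]
      simp only [List.map_cons]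
      have hh : r0.getLast?.getD "" = a := hlast r0 (by simp)
      have hall : ((Lt.map fun r => r.getLast?.getD "").all fun p => p == r0.getLast?.getD "") = true := by
        rw [List.all_eq_true]
        intro p hpmem
        obtain ⟨r, hrmem, rfl⟩ := List.mem_map.mp hpmem
        rw [hlast r (by simp [hrmem]), hh]
        simp
      simp only [hall, if_true, List.nil_append]
      have hlt : sumLen ((r0 :: Lt).map List.dropLast) < sumLen (r0 :: Lt) :=
        sumLen_lt_of_popAll (r0 :: Lt) (head := r0.getLast?.getD "")
          (restp := Lt.map fun r => r.getLast?.getD "") (by simpa using hp)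
      simp only [List.map_cons] at hlt
      rw [loopA_acc n _ (by omega) [r0.getLast?.getD ""], hh]
      refine List.cons_prefix_cons.mpr ⟨rfl, ?_⟩
      refine ih ((r0 :: Lt).map List.dropLast) q' (by simp only [List.map_cons]; omega) (by simp) ?_
      intro r' hr'
      obtain ⟨r, hrmem, rfl⟩ := List.mem_map.mp hr'
      obtain ⟨t, ht, hq't⟩ := List.cons_prefix_iff.mp (hq r hrmem)
      rw [← (rev_head_tail r a t ht).2.2]
      exact hq't

theorem lcpZip_prefix_left : ∀ (xs ys : List String), lcpZip xs ys <+: xs := by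
  intro xs
  induction xs with
  | nil => intro ys; cases ys <;> simp [lcpZip]
  | cons a xs ih =>
    intro ys
    cases ys with
    | nil => simp [lcpZip]
    | cons b ys =>
      by_cases h : a = b
      · simpa [lcpZip, h] using ih ys
      · simp [lcpZip, h]

theorem lcpZip_prefix_right : ∀ (xs ys : List String), lcpZip xs ys <+: ys := by
  intro xs
  induction xs with
  | nil => intro ys; cases ys <;> simp [lcpZip]
  | cons a xs ih =>
    intro ys
    cases ys with
    | nil => simp [lcpZip]
    | cons b ys =>
      by_cases h : a = b
      · subst h; simpa [lcpZip] using ih ys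
      · simp [lcpZip, h]

theorem prefix_lcpZip : ∀ (q xs ys : List String), q <+: xs → q <+: ys → q <+: lcpZip xs ys := by
  intro q
  induction q with
  | nil => intro xs ys _ _; exact List.nil_prefix
  | cons a q ih =>
    intro xs ys hx hy
    obtain ⟨tx, rfl⟩ := hx
    obtain ⟨ty, hy'⟩ := hy
    rw [List.cons_append] at hy'
    subst hy'
    rw [List.cons_append]
    rw [show lcpZip (a :: (q ++ tx)) (a :: (q ++ ty)) = if a == a then a :: lcpZip (q ++ tx) (q ++ ty) else [] from rfl]
    simp only [beq_self_eq_true, if_true]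
    exact (List.prefix_cons_inj a).mpr (ih _ _ ⟨tx, rfl⟩ ⟨ty, rfl⟩)

theorem lex_squeeze : ∀ (p lo hi s : List String), p <+: lo → p <+: hi → lo ≤ s → s ≤ hi → p <+: s := by
  intro p
  induction p with
  | nil => intro _ _ s _ _ _ _; exact List.nil_prefix
  | cons x p ih =>
    intro lo hi s hplo hphi hlos hshi
    obtain ⟨lo2, rfl, hp2⟩ := List.cons_prefix_iff.mp hplo
    obtain ⟨hi2, rfl, hp3⟩ := List.cons_prefix_iff.mp hphi
    cases s with
    | nil =>
      exact absurd ((List.Lex.nil : List.Lex (· < ·) [] (x :: lo2)) : ([] : List String) < x :: lo2)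
        (not_lt_of_ge hlos)
    | cons y s' =>
      rcases lt_trichotomy x y with hxy | hxy | hxy
      · exact absurd ((List.Lex.rel hxy : List.Lex (· < ·) (x :: hi2) (y :: s')) : x :: hi2 < y :: s')
          (not_lt_of_ge hshi)
      · subst hxy
        have h1 : lo2 ≤ s' := by
          by_contra hc
          have : s' < lo2 := lt_of_not_ge hc
          exact absurd ((List.Lex.cons this : List.Lex (· < ·) (x :: s') (x :: lo2)) : x :: s' < x :: lo2)
            (not_lt_of_ge hlos)
        have h2 : s' ≤ hi2 := by
          by_contra hc
          have : hi2 < s' := lt_of_not_ge hc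
          exact absurd ((List.Lex.cons this : List.Lex (· < ·) (x :: hi2) (x :: s')) : x :: hi2 < x :: s')
            (not_lt_of_ge hshi)
        exact List.cons_prefix_cons.mpr ⟨rfl, ih lo2 hi2 s' hp2 hp3 h1 h2⟩
      · exact absurd ((List.Lex.rel hxy : List.Lex (· < ·) (y :: s') (x :: lo2)) : y :: s' < x :: lo2)
          (not_lt_of_ge hlos)

-- min?/max? with the LinearOrder instance: bound conversions
theorem min?_isMin' {xs : List (List String)} {m : List String}
    (h : PySem.List.min? xs (fun x => x) = some m) : ∀ y ∈ xs, m ≤ y := by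
  have hinst : (fun (a b : List String) => a.decidableLT b) = (LinearOrder.toDecidableLT (α := List String)) := by
    funext a b; exact Subsingleton.elim _ _
  rw [show (PySem.List.min? xs (fun x => x) : Option (List String)) =
      @PySem.List.min? _ _ _ LinearOrder.toDecidableLT xs (fun x => x) from by rw [← hinst]] at h
  exact PySem.List.min?_isMin h

theorem max?_isMax' {xs : List (List String)} {m : List String}
    (h : PySem.List.max? xs (fun x => x) = some m) : ∀ y ∈ xs, y ≤ m := by
  have hinst : (fun (a b : List String) => a.decidableLT b) = (LinearOrder.toDecidableLT (α := List String)) := by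
    funext a b; exact Subsingleton.elim _ _
  rw [show (PySem.List.max? xs (fun x => x) : Option (List String)) =
      @PySem.List.max? _ _ _ LinearOrder.toDecidableLT xs (fun x => x) from by rw [← hinst]] at h
  exact PySem.List.max?_isMax h

-- the core equality: A's popping loop = lcpZip of the lexicographic min and max
theorem lcp_core_eq (splits : List (List String)) (hne : splits ≠ []) (lo hi : List String)
    (hlo : PySem.List.min? splits (fun x => x) = some lo)
    (hhi : PySem.List.max? splits (fun x => x) = some hi) :
    loopA (splits.map List.reverse) [] = lcpZip lo hi := by
  have hlomem := PySem.List.min?_mem hlo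
  have hhimem := PySem.List.max?_mem hhi
  have hlob := min?_isMin' hlo
  have hhib := max?_isMax' hhi
  have hmapne : splits.map List.reverse ≠ [] := by simpa using hne
  have hAcp : ∀ s ∈ splits, loopA (splits.map List.reverse) [] <+: s := by
    intro s hs
    simpa using loopA_cp (sumLen (splits.map List.reverse)) (splits.map List.reverse) le_rfl
      s.reverse (List.mem_map_of_mem hs)
  have hAmax : ∀ q, (∀ s ∈ splits, q <+: s) → q <+: loopA (splits.map List.reverse) [] := by
    intro q hq
    refine loopA_max (sumLen (splits.map List.reverse)) _ q le_rfl hmapne ?_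
    intro r hr
    obtain ⟨t, ht, rfl⟩ := List.mem_map.mp hr
    simpa using hq t ht
  have hBcp : ∀ s ∈ splits, lcpZip lo hi <+: s := by
    intro s hs
    exact lex_squeeze _ lo hi s (lcpZip_prefix_left lo hi) (lcpZip_prefix_right lo hi)
      (hlob s hs) (hhib s hs)
  have h1 : loopA (splits.map List.reverse) [] <+: lcpZip lo hi :=
    prefix_lcpZip _ lo hi (hAcp lo hlomem) (hAcp hi hhimem)
  have h2 : lcpZip lo hi <+: loopA (splits.map List.reverse) [] := hAmax _ hBcp
  exact h1.eq_of_length_le h2.length_le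

theorem alt_eq : ∀ (strings : List String), strings ≠ [] → ∀ (lo hi : List String),
    PySem.List.min? (strings.map splitDot) (fun x => x) = some lo →
    PySem.List.max? (strings.map splitDot) (fun x => x) = some hi →
    get_common_parts_alt strings = lcpZip lo hi := by
  intro strings hne lo hi hlo hhi
  cases strings with
  | nil => exact absurd rfl hne
  | cons s rest =>
    simp only [get_common_parts_alt, List.map_cons] at *
    rw [hlo, hhi]

theorem get_common_parts_spec : Claim_equal_get_common_parts := by
  intro strings _
  unfold Spec_get_common_parts
  cases strings with
  | nil =>
    show loopA [] [] = []
    rw [loopA_eq]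
    rfl
  | cons s rest =>
    have hne : (s :: rest).map splitDot ≠ [] := by simp
    cases hlo : PySem.List.min? ((s :: rest).map splitDot) (fun x => x) with
    | none => exact absurd ((PySem.List.min?_eq_none_iff _ _).mp hlo) hne
    | some lo =>
      cases hhi : PySem.List.max? ((s :: rest).map splitDot) (fun x => x) with
      | none => exact absurd ((PySem.List.max?_eq_none_iff _ _).mp hhi) hne
      | some hi =>
        rw [alt_eq (s :: rest) (by simp) lo hi hlo hhi]
        cases rest with
        | nil =>
          -- singleton: A returns splits[0][::-1] directly; lo = hi = splitDot s
          have hx : lo = splitDot s := by simpa using PySem.List.min?_mem hlo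
          have hy : hi = splitDot s := by simpa using PySem.List.max?_mem hhi
          subst hx; subst hy
          show (splitDot s).reverse.reverse = lcpZip (splitDot s) (splitDot s)
          rw [List.reverse_reverse]
          have h1 := lcpZip_prefix_left (splitDot s) (splitDot s)
          have h2 := prefix_lcpZip (splitDot s) (splitDot s) (splitDot s) List.prefix_rfl List.prefix_rfl
          exact h2.eq_of_length_le h1.length_le
        | cons r rs =>
          show loopA ((s :: r :: rs).map (fun t => (splitDot t).reverse)) [] = lcpZip lo hi
          have hmm : (s :: r :: rs).map (fun t => (splitDot t).reverse) =
              ((s :: r :: rs).map splitDot).map List.reverse := by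
            rw [List.map_map]; rfl
          rw [hmm]
          exact lcp_core_eq ((s :: r :: rs).map splitDot) (by simp) lo hi hlo hhi
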